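-- pv_equiv track=rewrite | github.com/cfausn/Main | coursework/CSCI-141/test_debug_hw.py | is_reverse_of
-- ===== SOURCE A (Python) =====
-- def is_reverse_of( st1, st2 ):
--     """
--     is_reverse_of : String String -> Boolean
--     is_reverse_of tells if one string is the reverse of another.
--     preconditions: st1 and st2 are character strings.
--     """
--     if len( st1 ) != len( st2 ):
--         return False
--     i = 0
--     j = len( st2 )
--     while j > 0:
--         j -= 1 #have to make this subtract first so index isn't out of range
--         if st1[i] != st2[j]:
--             return False
--         i += 1
--
--     return True
-- ===== SOURCE B (Python) =====
-- def is_reverse_of(st1, st2):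
--     return st1 == st2[::-1]
-- ===== Notes on version B (the rewrite author's own statement) =====
-- stated objective: idiomatic
-- what changed: Replaces the explicit length check and two-pointer index loop with building st2 reversed via slicing and one whole-string equality comparison.
import Mathlib
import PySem

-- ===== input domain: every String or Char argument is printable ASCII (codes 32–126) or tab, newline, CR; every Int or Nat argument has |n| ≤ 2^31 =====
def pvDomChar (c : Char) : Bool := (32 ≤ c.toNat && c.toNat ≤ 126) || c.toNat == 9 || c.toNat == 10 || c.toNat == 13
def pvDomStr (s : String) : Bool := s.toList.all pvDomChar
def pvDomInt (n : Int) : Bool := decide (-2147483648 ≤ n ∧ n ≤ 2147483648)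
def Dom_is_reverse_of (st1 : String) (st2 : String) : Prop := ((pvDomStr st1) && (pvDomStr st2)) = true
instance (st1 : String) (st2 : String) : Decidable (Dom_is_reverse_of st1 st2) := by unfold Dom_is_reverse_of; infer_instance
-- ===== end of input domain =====

-- B replaces A's length check and two-pointer character loop with one slice-reversal of st2
-- and a single whole-string equality comparison (idiomatic; same cost).

-- ===== PORT A =====
-- the while loop: j counts down, i counts up; compares st1[i] with st2[j]
def isRevLoop (l1 l2 : List Char) : Nat → Nat → Bool
  | _, 0 => true
  | i, j + 1 =>
      if PySem.List.pyGet? l1 (i : Int) ≠ PySem.List.pyGet? l2 (j : Int) then false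
      else isRevLoop l1 l2 (i + 1) j

def is_reverse_of (st1 : String) (st2 : String) : Bool :=
  if PySem.Str.len st1 ≠ PySem.Str.len st2 then false
  else isRevLoop st1.toList st2.toList 0 st2.toList.length

-- ===== PORT B =====
def is_reverse_of_alt (st1 : String) (st2 : String) : Bool :=
  match PySem.Str.slice? st2 none none (-1) with   -- st2[::-1]
  | some r => st1 == r
  | none => false

-- ===== PRECONDITION & SPEC =====
def Spec_is_reverse_of (st1 : String) (st2 : String) (out : Bool) : Prop := out = is_reverse_of_alt st1 st2
instance (st1 : String) (st2 : String) (out : Bool) : Decidable (Spec_is_reverse_of st1 st2 out) := by unfold Spec_is_reverse_of; infer_instance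

-- ===== CLAIM (what is proved, stated in full; the proofs are below) =====
def Claim_equal_is_reverse_of : Prop := ∀ (st1 : String) (st2 : String), Dom_is_reverse_of st1 st2 → Spec_is_reverse_of st1 st2 (is_reverse_of st1 st2)

-- ===== LEMMAS AND PROOFS =====

-- loop invariant: with i + j = |l1| and |l1| = |l2|, the loop decides l1.drop i = (l2.take j).reverse
set_option maxRecDepth 4000 in
theorem isRevLoop_eq (l1 l2 : List Char) (j i : Nat)
    (h1 : i + j = l1.length) (h2 : l1.length = l2.length) :
    isRevLoop l1 l2 i j = decide (l1.drop i = (l2.take j).reverse) := by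
  induction j generalizing i with
  | zero =>
      have : l1.drop i = [] := List.drop_eq_nil_of_le (by omega)
      simp [isRevLoop, this]
  | succ j ih =>
      have hi : i < l1.length := by omega
      have hj : j < l2.length := by omega
      have g1 : PySem.List.pyGet? l1 (i : Int) = some l1[i] := by
        simp [PySem.List.pyGet?_natCast, List.getElem?_eq_getElem hi]
      have g2 : PySem.List.pyGet? l2 (j : Int) = some l2[j] := by
        simp [PySem.List.pyGet?_natCast, List.getElem?_eq_getElem hj]
      have hdrop : l1.drop i = l1[i] :: l1.drop (i + 1) := List.drop_eq_getElem_cons hi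
      have htake : l2.take (j + 1) = l2.take j ++ [l2[j]] := by
        rw [List.take_add_one, List.getElem?_eq_getElem hj]; rfl
      rw [isRevLoop]
      by_cases hc : l1[i] = l2[j]
      · rw [if_neg (by simp [g1, g2, hc]), ih (i + 1) (by omega)]
        rw [hdrop, htake]
        simp only [List.reverse_append, List.reverse_cons, List.reverse_nil,
          List.nil_append, List.singleton_append, List.cons.injEq, hc, true_and]
      · rw [if_pos (by simp [g1, g2, hc])]
        rw [hdrop, htake]
        simp only [List.reverse_append, List.reverse_cons, List.reverse_nil, List.nil_append,
          List.singleton_append]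
        have hne : (l1[i] :: l1.drop (i + 1)) ≠ l2[j] :: (l2.take j).reverse := by
          intro h
          exact hc (List.cons_eq_cons.mp h).1
        exact (decide_eq_false hne).symm

theorem alt_eq (st1 st2 : String) :
    is_reverse_of_alt st1 st2 = decide (st1.toList = st2.toList.reverse) := by
  simp only [is_reverse_of_alt, PySem.Str.slice?_none_none_neg_one]
  by_cases h : st1.toList = st2.toList.reverse
  · have he : st1 = String.ofList st2.toList.reverse := String.ext (by simpa using h)
    simp [he]
  · have hne : st1 ≠ String.ofList st2.toList.reverse := fun he => h (by rw [he]; simp)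
    simp [h, hne]

-- ===== VERDICT (by name: the statement is the Claim_ definition above) =====
theorem is_reverse_of_spec : Claim_equal_is_reverse_of := by
  intro st1 st2 _
  unfold Spec_is_reverse_of
  rw [alt_eq, is_reverse_of]
  by_cases hlen : st1.toList.length = st2.toList.length
  · rw [if_neg (by simp [PySem.Str.len, String.length_toList] at hlen ⊢; omega)]
    rw [isRevLoop_eq st1.toList st2.toList st2.toList.length 0 (by omega) hlen,
      List.drop_zero, List.take_length]
  · rw [if_pos (by simp [PySem.Str.len, String.length_toList] at hlen ⊢; omega)]
    have : st1.toList ≠ st2.toList.reverse := by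
      intro h
      apply hlen
      rw [h]; simp
    simp [this]
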